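-- pv_equiv track=rewrite | github.com/heremaps/bike-navigation | arduino/generate_icons_led_matrix_studio.py | readRow
-- ===== SOURCE A (Python) =====
-- def readRow(line):
--     byte = 0;
--     rowBits = line.split()
--     for bit in rowBits:
--         if bit == "000000":
--             byte = byte << 1
--         else:
--             byte = (byte << 1) | 1
--     return byte
-- ===== SOURCE B (Python) =====
-- def _value(toks):
--     # divide and conquer: value of the whole row = value(left half) * 2**len(right half) + value(right half)
--     n = len(toks)
--     if n == 0:
--         return 0
--     if n == 1:
--         return 0 if toks[0] == "000000" else 1
--     mid = n // 2
--     return _value(toks[:mid]) * 2 ** (n - mid) + _value(toks[mid:])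
--
-- def readRow(line):
--     return _value(line.split())
-- ===== Notes on version B (the rewrite author's own statement) =====
-- stated objective: alternative
-- what changed: Replaces A's left-to-right shift/OR accumulator loop with a divide-and-conquer recursion: the token list is split in half, each half is valued recursively, and the halves are combined as left*2**len(right)+right.
import Mathlib
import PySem

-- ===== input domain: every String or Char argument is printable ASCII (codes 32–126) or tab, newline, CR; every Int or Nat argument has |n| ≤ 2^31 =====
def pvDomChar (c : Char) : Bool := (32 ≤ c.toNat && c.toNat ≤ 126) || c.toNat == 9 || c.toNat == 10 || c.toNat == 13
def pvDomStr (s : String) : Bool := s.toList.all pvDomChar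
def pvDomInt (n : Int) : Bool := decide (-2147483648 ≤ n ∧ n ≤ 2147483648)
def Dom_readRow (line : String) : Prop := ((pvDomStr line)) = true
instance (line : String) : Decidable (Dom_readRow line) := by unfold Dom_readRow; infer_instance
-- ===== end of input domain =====

-- B replaces A's left-to-right shift/OR accumulator loop by a divide-and-conquer recursion on the token list (alternative decomposition, same result).

-- ===== PORT A =====
def readRow (line : String) : Int :=
  (PySem.Str.split₀ line).foldl
    (fun (byte : Int) (bit : String) =>
      if bit == "000000" then byte <<< (1 : Nat)
      else PySem.Int.bor (byte <<< (1 : Nat)) 1)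
    0

-- ===== PORT B =====
/-- Port of Source B's `_value`: divide and conquer over the token list.
`n // 2` on the nonnegative list length is exactly Python's `n // 2`, and
`2 ** (n - mid)` with `mid ≤ n` is exactly `2 ^ (n - mid)` on Nat exponent. -/
def pvValue (toks : List String) : Int :=
  let n := toks.length
  if n = 0 then 0
  else if n = 1 then (if PySem.List.pyGetD toks (0 : Int) "" == "000000" then 0 else 1)
  else
    let mid := n / 2
    pvValue (PySem.List.slice toks none (some (mid : Int))) * 2 ^ (n - mid)
      + pvValue (PySem.List.slice toks (some (mid : Int)) none)
termination_by toks.length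
decreasing_by
  · simp only [PySem.List.slice_to_natCast, List.length_take]
    omega
  · simp only [PySem.List.slice_from_natCast, List.length_drop]
    omega

def readRow_alt (line : String) : Int :=
  pvValue (PySem.Str.split₀ line)

-- ===== PRECONDITION & SPEC =====
def Spec_readRow (line : String) (out : Int) : Prop := out = readRow_alt line
instance (line : String) (out : Int) : Decidable (Spec_readRow line out) := by unfold Spec_readRow; infer_instance

-- ===== CLAIM (what is proved, stated in full; the proofs are below) =====
def Claim_equal_readRow : Prop := ∀ (line : String), Dom_readRow line → Spec_readRow line (readRow line)

-- ===== LEMMAS AND PROOFS =====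

/-- Bit contributed by one token. -/
def pvBit (t : String) : Int := if t == "000000" then 0 else 1

/-- Big-endian value of a token list. -/
def pvVal : List String → Int
  | [] => 0
  | t :: ts => pvBit t * 2 ^ ts.length + pvVal ts

theorem pvVal_append (xs ys : List String) :
    pvVal (xs ++ ys) = pvVal xs * 2 ^ ys.length + pvVal ys := by
  induction xs with
  | nil => simp [pvVal]
  | cons x xs ih =>
    simp only [List.cons_append, pvVal, ih, List.length_append]
    ring

theorem pvShift (a : Int) : a <<< (1 : Nat) = 2 * a := by
  have : a <<< (1 : Nat) = a * 2 ^ (1 : Nat) := Int.shiftLeft_eq a 1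
  omega

theorem pvLorOne (m : Nat) : 2 * m ||| 1 = 2 * m + 1 := by
  apply Nat.eq_of_testBit_eq
  intro i
  rw [Nat.testBit_or]
  cases i with
  | zero =>
    have h1 : (2 * m) % 2 = 0 := by omega
    have h2 : (2 * m + 1) % 2 = 1 := by omega
    simp [Nat.testBit_zero, h1, h2]
  | succ i =>
    have h1 : 2 * m / 2 = m := by omega
    have h2 : (2 * m + 1) / 2 = m := by omega
    simp [Nat.testBit_add_one, h1, h2]

theorem pvBor (a : Int) (h : 0 ≤ a) : PySem.Int.bor (2 * a) 1 = 2 * a + 1 := by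
  rw [PySem.Int.bor_of_nonneg (by omega) (by omega)]
  have h1 : (2 * a).toNat = 2 * a.toNat := by omega
  have h2 : (1 : Int).toNat = 1 := rfl
  rw [h1, h2, pvLorOne]
  omega

/-- A's fold from a nonnegative accumulator computes the big-endian value. -/
theorem pvFoldA (ts : List String) (a : Int) (h : 0 ≤ a) :
    ts.foldl (fun (byte : Int) (bit : String) =>
      if bit == "000000" then byte <<< (1 : Nat)
      else PySem.Int.bor (byte <<< (1 : Nat)) 1) a
      = a * 2 ^ ts.length + pvVal ts := by
  induction ts generalizing a with
  | nil => simp [pvVal]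
  | cons t ts ih =>
    simp only [List.foldl_cons, pvVal, List.length_cons]
    by_cases hc : t == "000000"
    · rw [if_pos hc, pvShift, ih _ (by omega)]
      simp only [pvBit, if_pos hc]
      ring
    · rw [if_neg hc, pvShift, pvBor a h, ih _ (by omega)]
      simp only [pvBit, if_neg hc]
      ring

/-- B's divide-and-conquer computes the big-endian value. -/
theorem pvValue_eq (toks : List String) : pvValue toks = pvVal toks := by
  have H : ∀ (n : Nat) (ts : List String), ts.length ≤ n → pvValue ts = pvVal ts := by
    intro n
    induction n with
    | zero =>
      intro ts h
      have hts : ts = [] := List.length_eq_zero_iff.mp (Nat.le_zero.mp h)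
      subst hts
      rw [pvValue]
      simp [pvVal]
    | succ n ih =>
      intro ts h
      rw [pvValue]
      by_cases h0 : ts.length = 0
      · have hts : ts = [] := List.length_eq_zero_iff.mp h0
        subst hts
        simp [pvVal]
      · rw [if_neg h0]
        by_cases h1 : ts.length = 1
        · obtain ⟨t, ht⟩ := List.length_eq_one_iff.mp h1
          subst ht
          simp [pvVal, pvBit, PySem.List.pyGetD_zero_cons]
        · rw [if_neg h1]
          simp only [PySem.List.slice_to_natCast, PySem.List.slice_from_natCast]
          rw [ih _ (by simp [List.length_take]; omega), ih _ (by simp [List.length_drop]; omega)]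
          have hsplit := List.take_append_drop (ts.length / 2) ts
          calc pvVal (List.take (ts.length / 2) ts) * 2 ^ (ts.length - ts.length / 2)
                  + pvVal (List.drop (ts.length / 2) ts)
              = pvVal (List.take (ts.length / 2) ts)
                  * 2 ^ (List.drop (ts.length / 2) ts).length
                  + pvVal (List.drop (ts.length / 2) ts) := by
                rw [List.length_drop]
            _ = pvVal ts := by rw [← pvVal_append, hsplit]
  exact H toks.length toks le_rfl

-- ===== VERDICT (by name: the statement is the Claim_ definition above) =====
theorem readRow_spec : Claim_equal_readRow := by
  intro line _
  unfold Spec_readRow readRow readRow_alt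
  rw [pvFoldA _ 0 le_rfl, pvValue_eq]
  simp
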